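-- pv_equiv track=rewrite | github.com/aurianeb/SMATS | Artery_With_OD/lp.py | compute_delta0
-- ===== SOURCE A (Python) =====
-- def compute_delta0(delta, travel_time_incoming, travel_time_outgoing, C):
--     delta0 = [delta[0]]
--     running_sum = 0
--     n = len(delta)
--     for i in range(1, n):
--         running_sum += travel_time_incoming[i - 1] - travel_time_outgoing[i - 1]
--         delta0.append(modulo(delta[i] + running_sum, C))
--     return delta0
--
-- def modulo(t, C):
--     """
--     Custom modulo function
--     :param t:
--     :type t:
--     :param C:
--     :type C:
--     :return:
--     :rtype:
--     """
--     res = t // C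
--     if t - res * C < (res + 1) * C - t:
--         return t - res * C
--     else:
--         return t - (res + 1) * C
-- ===== SOURCE B (Python) =====
-- def modulo(t, C):
--     # balanced residue: same value as A's modulo, computed from Python's %
--     r = t % C
--     return r if 2 * r < C else r - C
--
-- def compute_delta0(delta, travel_time_incoming, travel_time_outgoing, C):
--     # closed form per index: no running state at all; the offset at position i is
--     # simply sum(incoming[:i]) - sum(outgoing[:i])
--     return [delta[0]] + [
--         modulo(delta[i] + sum(travel_time_incoming[:i]) - sum(travel_time_outgoing[:i]), C)
--         for i in range(1, len(delta))
--     ]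
-- ===== Notes on version B (the rewrite author's own statement) =====
-- stated objective: alternative
-- what changed: Replaces A's stateful loop (a running-sum accumulator threaded through the iterations, appending as it goes) with a stateless closed form: each output element is computed independently as modulo(delta[i] + sum(incoming[:i]) - sum(outgoing[:i]), C) via slice sums, and the balanced modulo is computed from Python's % with a 2*r < C test instead of A's floordiv-and-two-candidates form; B trades O(n) for O(n^2) slice sums in exchange for having no loop-carried state.
import Mathlib
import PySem

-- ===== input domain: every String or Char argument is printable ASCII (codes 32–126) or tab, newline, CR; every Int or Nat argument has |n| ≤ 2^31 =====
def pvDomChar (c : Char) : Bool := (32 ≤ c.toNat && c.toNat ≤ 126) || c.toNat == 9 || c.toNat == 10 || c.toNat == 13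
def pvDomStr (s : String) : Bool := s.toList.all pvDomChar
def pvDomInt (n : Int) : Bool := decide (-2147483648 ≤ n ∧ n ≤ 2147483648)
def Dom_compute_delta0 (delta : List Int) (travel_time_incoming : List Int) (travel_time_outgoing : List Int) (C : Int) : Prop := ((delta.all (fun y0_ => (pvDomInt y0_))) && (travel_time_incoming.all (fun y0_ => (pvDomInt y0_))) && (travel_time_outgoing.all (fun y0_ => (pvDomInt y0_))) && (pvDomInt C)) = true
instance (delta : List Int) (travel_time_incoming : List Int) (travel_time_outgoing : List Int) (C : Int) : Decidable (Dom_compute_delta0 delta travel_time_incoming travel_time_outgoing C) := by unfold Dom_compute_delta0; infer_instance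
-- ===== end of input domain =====

-- B replaces A's stateful running-sum loop by a stateless closed form (each element computed
-- independently from slice sums) and a %-based balanced-modulo helper; alternative, not faster.

-- ===== PORT A =====
-- A's helper 'modulo' (floordiv-based, picks the nearer of two candidate residues)
def pyModuloA (t C : Int) : Int :=
  let res := PySem.Int.floordiv t C
  if t - res * C < (res + 1) * C - t then t - res * C else t - (res + 1) * C

-- delta[i] / travel[...][i-1] are Python getitems that raise when out of range; Pre_ keeps every
-- index in range, so the default of pyGetD is never reached inside Pre_ (exact there).
def compute_delta0 (delta : List Int) (travel_time_incoming : List Int) (travel_time_outgoing : List Int) (C : Int) : List Int :=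
  let delta0 : List Int := [PySem.List.pyGetD delta 0 0]
  let n : Int := delta.length
  ((PySem.List.pyRange 1 n 1).foldl (fun (st : List Int × Int) i =>
      let running_sum := st.2 + (PySem.List.pyGetD travel_time_incoming (i - 1) 0 - PySem.List.pyGetD travel_time_outgoing (i - 1) 0)
      (st.1 ++ [pyModuloA (PySem.List.pyGetD delta i 0 + running_sum) C], running_sum))
    (delta0, 0)).1

-- ===== PORT B =====
-- B's helper 'modulo' (computed from Python's %, exact: PySem.Int.mod is Python's floor mod)
def pyModuloB (t C : Int) : Int :=
  let r := PySem.Int.mod t C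
  if 2 * r < C then r else r - C

-- stateless closed form: element i is modulo(delta[i] + sum(tin[:i]) - sum(tout[:i]), C)
def compute_delta0_alt (delta : List Int) (travel_time_incoming : List Int) (travel_time_outgoing : List Int) (C : Int) : List Int :=
  [PySem.List.pyGetD delta 0 0] ++
    (PySem.List.pyRange 1 (delta.length : Int) 1).map (fun i =>
      pyModuloB (PySem.List.pyGetD delta i 0
        + (PySem.List.slice travel_time_incoming none (some i)).sum
        - (PySem.List.slice travel_time_outgoing none (some i)).sum) C)

-- ===== PRECONDITION & SPEC =====
-- Pre_ excludes exactly the inputs where the Python A raises: empty delta (IndexError on delta[0]),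
-- travel lists shorter than len(delta)-1 (IndexError inside the loop), and C = 0 when the loop
-- runs at all (ZeroDivisionError in modulo).
def Pre_compute_delta0 (delta : List Int) (travel_time_incoming : List Int) (travel_time_outgoing : List Int) (C : Int) : Prop :=
  delta ≠ [] ∧ delta.length - 1 ≤ travel_time_incoming.length ∧ delta.length - 1 ≤ travel_time_outgoing.length ∧ (1 < delta.length → C ≠ 0)
instance (delta : List Int) (travel_time_incoming : List Int) (travel_time_outgoing : List Int) (C : Int) : Decidable (Pre_compute_delta0 delta travel_time_incoming travel_time_outgoing C) := by unfold Pre_compute_delta0; infer_instance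
def pvWitness_compute_delta0 : List Int × List Int × List Int × Int := ([3, 10, -4], [5, 2], [1, 7], 6)
def Spec_compute_delta0 (delta : List Int) (travel_time_incoming : List Int) (travel_time_outgoing : List Int) (C : Int) (out : List Int) : Prop := out = compute_delta0_alt delta travel_time_incoming travel_time_outgoing C
instance (delta : List Int) (travel_time_incoming : List Int) (travel_time_outgoing : List Int) (C : Int) (out : List Int) : Decidable (Spec_compute_delta0 delta travel_time_incoming travel_time_outgoing C out) := by unfold Spec_compute_delta0; infer_instance

-- ===== CLAIM =====
def Claim_equal_compute_delta0 : Prop := ∀ (delta : List Int) (travel_time_incoming : List Int) (travel_time_outgoing : List Int) (C : Int), Dom_compute_delta0 delta travel_time_incoming travel_time_outgoing C → Pre_compute_delta0 delta travel_time_incoming travel_time_outgoing C → Spec_compute_delta0 delta travel_time_incoming travel_time_outgoing C (compute_delta0 delta travel_time_incoming travel_time_outgoing C)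

-- ===== LEMMAS AND PROOFS =====

-- A's modulo and B's modulo agree (uses floordiv*C + mod = t; holds for every C)
theorem pyModulo_eq (t C : Int) : pyModuloA t C = pyModuloB t C := by
  have h := PySem.Int.floordiv_mul_add_mod t C
  have e : (PySem.Int.floordiv t C + 1) * C = PySem.Int.floordiv t C * C + C := by ring
  unfold pyModuloA pyModuloB
  simp only [e]
  omega

-- prefix sum of the first i differences travel_in[j] - travel_out[j]
def pvS (tin tout : List Int) (i : Nat) : Int :=
  ((List.range i).map (fun j => PySem.List.pyGetD tin (j : Int) 0 - PySem.List.pyGetD tout (j : Int) 0)).sum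

theorem pvS_succ (tin tout : List Int) (m : Nat) :
    pvS tin tout (m + 1) = pvS tin tout m + (PySem.List.pyGetD tin (m : Int) 0 - PySem.List.pyGetD tout (m : Int) 0) := by
  simp [pvS, List.range_succ]

-- A's loop: state after m iterations is (prefix of the answer, pvS m)
theorem foldA_char (delta tin tout : List Int) (C : Int) (acc0 : List Int) : ∀ m : Nat,
    (PySem.List.pyRange 1 (1 + (m : Int)) 1).foldl (fun (st : List Int × Int) i =>
      let running_sum := st.2 + (PySem.List.pyGetD tin (i - 1) 0 - PySem.List.pyGetD tout (i - 1) 0)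
      (st.1 ++ [pyModuloA (PySem.List.pyGetD delta i 0 + running_sum) C], running_sum)) (acc0, 0)
    = (acc0 ++ (List.range m).map (fun (k : Nat) => pyModuloA (PySem.List.pyGetD delta ((k : Int) + 1) 0 + pvS tin tout (k + 1)) C), pvS tin tout m) := by
  intro m
  induction m with
  | zero =>
      rw [show (1 : Int) + ((0:Nat) : Int) = 1 by norm_num, PySem.List.pyRange_one_eq_nil le_rfl]
      simp [pvS]
  | succ m ih =>
      rw [show (1 : Int) + ((m + 1 : Nat) : Int) = (1 + (m : Int)) + 1 by push_cast; ring,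
        PySem.List.pyRange_one_succ_right (by omega), List.foldl_append, ih]
      simp only [List.foldl_cons, List.foldl_nil]
      rw [List.range_succ, List.map_append]
      have h1 : (1 : Int) + (m : Int) - 1 = (m : Int) := by ring
      have h2 : (1 : Int) + (m : Int) = (m : Int) + 1 := by ring
      rw [h1, h2, ← pvS_succ]
      simp [List.append_assoc]

-- range(1, 1+m) as a shifted Nat range
theorem pyRange_one_shift (m : Nat) :
    PySem.List.pyRange 1 (1 + (m : Int)) 1 = List.map (fun k : Nat => (k : Int) + 1) (List.range m) := by
  induction m with
  | zero =>
      rw [show (1 : Int) + ((0:Nat) : Int) = 1 by norm_num, PySem.List.pyRange_one_eq_nil le_rfl]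
      simp
  | succ m ih =>
      rw [show (1 : Int) + ((m + 1 : Nat) : Int) = (1 + (m : Int)) + 1 by push_cast; ring,
        PySem.List.pyRange_one_succ_right (by omega), ih, List.range_succ, List.map_append]
      norm_num
      ring

theorem sum_take_succ (l : List Int) (i : Nat) (h : i < l.length) :
    (l.take (i + 1)).sum = (l.take i).sum + l[i] := by
  rw [List.take_add_one, List.sum_append, List.getElem?_eq_getElem h]
  simp

-- the prefix sum equals the difference of slice sums, when the slices are full
theorem pvS_eq_take (tin tout : List Int) : ∀ i : Nat, i ≤ tin.length → i ≤ tout.length →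
    pvS tin tout i = (tin.take i).sum - (tout.take i).sum := by
  intro i
  induction i with
  | zero => simp [pvS]
  | succ i ih =>
      intro h1 h2
      rw [pvS_succ, ih (by omega) (by omega), sum_take_succ _ _ (by omega), sum_take_succ _ _ (by omega)]
      simp only [PySem.List.pyGetD_natCast, List.getD_eq_getElem?_getD,
        List.getElem?_eq_getElem (by omega : i < tin.length),
        List.getElem?_eq_getElem (by omega : i < tout.length), Option.getD_some]
      ring

theorem compute_delta0_main (delta tin tout : List Int) (C : Int)
    (hne : delta ≠ []) (hin : delta.length - 1 ≤ tin.length) (hout : delta.length - 1 ≤ tout.length) :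
    compute_delta0 delta tin tout C = compute_delta0_alt delta tin tout C := by
  obtain ⟨m, hm⟩ : ∃ m : Nat, delta.length = m + 1 :=
    ⟨delta.length - 1, by cases delta <;> simp_all⟩
  rw [hm] at hin hout
  unfold compute_delta0 compute_delta0_alt
  simp only [hm]
  have h1 : ((m + 1 : Nat) : Int) = 1 + (m : Int) := by push_cast; ring
  rw [h1, foldA_char, pyRange_one_shift, List.map_map]
  simp only [List.cons_append, List.nil_append]
  congr 1
  apply List.map_congr_left
  intro k hk
  have hk' : k < m := List.mem_range.mp hk
  rw [pyModulo_eq]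
  have hc : ((k : Int) + 1) = ((k + 1 : Nat) : Int) := by push_cast; ring
  simp only [Function.comp_apply, hc, PySem.List.slice_to_natCast]
  rw [pvS_eq_take tin tout (k + 1) (by omega) (by omega)]
  ring_nf

-- ===== VERDICT =====
theorem compute_delta0_spec : Claim_equal_compute_delta0 := by
  intro delta tin tout C _hDom hPre
  unfold Spec_compute_delta0
  exact compute_delta0_main delta tin tout C hPre.1 hPre.2.1 hPre.2.2.1
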